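-- pv_equiv track=rewrite | github.com/daniel-reich/ubiquitous-fiesta | 4s9kNQFfk4D4Lbm4q_8.py | ABA
-- ===== SOURCE A (Python) =====
-- def ABA(s):
--   a = "ABCDEFGHIJKLMNOPQRSTUVWXYZ"
--   arr = []
--   for i in range(a.index(s)+1):
--     if len(arr) > 0:
--       l = arr[-1]
--       arr.append(l + a[i] + l)
--     else : arr.append(a[i])
--   return arr[-1]
-- ===== SOURCE B (Python) =====
-- def ABA(s):
--   a = "ABCDEFGHIJKLMNOPQRSTUVWXYZ"
--   idx = a.index(s)
--   def build(i):
--     if i == 0: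
--       return a[0]
--     r = build(i - 1)
--     return r + a[i] + r
--   return build(idx)
-- ===== Notes on version B (the rewrite author's own statement) =====
-- stated objective: alternative
-- what changed: Replaces the accumulator-list loop (building all intermediate strings in a list and reading arr[-1]) with a self-similar recursive helper build(i) = build(i-1) + a[i] + build(i-1) computed directly from idx = a.index(s).
import Mathlib
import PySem

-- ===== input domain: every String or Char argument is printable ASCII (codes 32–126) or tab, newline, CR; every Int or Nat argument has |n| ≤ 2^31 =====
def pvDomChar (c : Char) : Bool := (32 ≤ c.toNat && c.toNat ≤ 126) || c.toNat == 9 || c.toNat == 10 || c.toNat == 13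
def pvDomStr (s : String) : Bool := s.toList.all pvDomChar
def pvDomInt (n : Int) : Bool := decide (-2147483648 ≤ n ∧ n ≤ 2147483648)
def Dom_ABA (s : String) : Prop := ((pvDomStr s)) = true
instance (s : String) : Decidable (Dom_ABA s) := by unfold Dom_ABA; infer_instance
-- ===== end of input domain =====

-- B replaces A's accumulator-list loop by a direct recursion build(i) = build(i-1) + a[i] + build(i-1); same cost, different decomposition.

-- ===== PORT A =====
-- the loop body: if len(arr) > 0: l = arr[-1]; arr.append(l + a[i] + l) else: arr.append(a[i])
def abaStep (alpha : List Char) (arr : List (List Char)) (i : Int) : List (List Char) :=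
  if arr.length > 0 then
    let l := PySem.List.pyGetD arr (-1) []
    arr ++ [l ++ [PySem.List.pyGetD alpha i 'A'] ++ l]
  else arr ++ [[PySem.List.pyGetD alpha i 'A']]

def ABA (s : String) : String :=
  let alpha := "ABCDEFGHIJKLMNOPQRSTUVWXYZ".toList
  let arr := (PySem.List.pyRange 0 (PySem.Chars.find alpha s.toList + 1) 1).foldl
      (abaStep alpha) []
  String.ofList (PySem.List.pyGetD arr (-1) [])

-- ===== PORT B =====
def abaBuild (alpha : List Char) : Nat → List Char
  | 0 => [alpha.getD 0 'A']
  | n + 1 =>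
      let r := abaBuild alpha n
      r ++ [alpha.getD (n + 1) 'A'] ++ r

def ABA_alt (s : String) : String :=
  let alpha := "ABCDEFGHIJKLMNOPQRSTUVWXYZ".toList
  let idx := PySem.Chars.find alpha s.toList
  -- a.index(s) raises ValueError when idx = -1; those inputs are outside Pre_ABA
  if 0 ≤ idx then String.ofList (abaBuild alpha idx.toNat) else ""

-- ===== PRECONDITION & SPEC =====
-- Pre_ excludes exactly the inputs where a.index(s) raises ValueError: s not a substring of the alphabet.
def Pre_ABA (s : String) : Prop := s.toList <:+: "ABCDEFGHIJKLMNOPQRSTUVWXYZ".toList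
instance (s : String) : Decidable (Pre_ABA s) := by unfold Pre_ABA; infer_instance

def pvWitness_ABA : String := "E"

def Spec_ABA (s : String) (out : String) : Prop := out = ABA_alt s
instance (s : String) (out : String) : Decidable (Spec_ABA s out) := by unfold Spec_ABA; infer_instance

-- ===== CLAIM (what is proved, stated in full; the proofs are below) =====
def Claim_equal_ABA : Prop := ∀ (s : String), Dom_ABA s → Pre_ABA s → Spec_ABA s (ABA s)

-- ===== LEMMAS AND PROOFS =====

-- the A-loop up to n+1 iterations ends in a list whose last element is abaBuild n
theorem abaLoop_last (alpha : List Char) (n : Nat) :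
    ∃ pre, (PySem.List.pyRange 0 ((n : Int) + 1) 1).foldl (abaStep alpha) [] =
      pre ++ [abaBuild alpha n] := by
  induction n with
  | zero =>
      refine ⟨[], ?_⟩
      rw [show ((0:Nat):Int) + 1 = 0 + 1 by norm_num,
        PySem.List.pyRange_one_cons (by norm_num), PySem.List.pyRange_one_eq_nil (by norm_num)]
      simp [abaStep, abaBuild, List.getD, PySem.List.pyGetD_zero]
  | succ n ih =>
      obtain ⟨pre, hpre⟩ := ih
      refine ⟨pre ++ [abaBuild alpha n], ?_⟩
      have hsplit : PySem.List.pyRange 0 ((n : Int) + 1 + 1) 1 =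
          PySem.List.pyRange 0 ((n : Int) + 1) 1 ++ [(n : Int) + 1] :=
        PySem.List.pyRange_one_succ_right (show (0:Int) ≤ (n:Int)+1 by omega)
      have hcast : ((n + 1 : Nat) : Int) + 1 = ((n : Int) + 1) + 1 := by push_cast; ring
      rw [hcast, hsplit, List.foldl_append, hpre]
      simp [abaStep, abaBuild, PySem.List.pyGetD_neg_one_append_singleton]
      have h2 : ((n : Int) + 1) = ((n + 1 : Nat) : Int) := by push_cast; ring
      rw [h2, PySem.List.pyGetD_natCast]
      simp [List.getD]

-- ===== VERDICT (by name: the statement is the Claim_ definition above) =====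

theorem ABA_spec : Claim_equal_ABA := by
  intro s _ hpre
  unfold Spec_ABA ABA ABA_alt
  dsimp only
  set alpha := "ABCDEFGHIJKLMNOPQRSTUVWXYZ".toList with halpha
  have hfind : 0 ≤ PySem.Chars.find alpha s.toList :=
    (PySem.Chars.find_nonneg_iff alpha s.toList).mpr hpre
  obtain ⟨n, hn⟩ : ∃ n : Nat, PySem.Chars.find alpha s.toList = (n : Int) :=
    ⟨_, (Int.toNat_of_nonneg hfind).symm⟩
  rw [hn, if_pos (by omega : (0:Int) ≤ (n : Int))]
  obtain ⟨pre, hpre'⟩ := abaLoop_last alpha n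
  rw [hpre', PySem.List.pyGetD_neg_one_append_singleton, Int.toNat_natCast]
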